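-- pv_equiv track=rewrite | github.com/lvonbank/IT210-Python | Ch.6/P6_6.py | sumWithoutSmallest
-- ===== SOURCE A (Python) =====
-- def sumWithoutSmallest(values):
--     if values != []:
--         smallest = values[0]
--         listSum = 0
--         for i in range(len(values)):
--             if values[i] < smallest:
--                 smallest = values[i]
--             listSum += values[i]
--         return listSum - smallest
--     return 0
-- ===== SOURCE B (Python) =====
-- def sumWithoutSmallest(values):
--     return sum(sorted(values)[1:])
-- ===== Notes on version B (the rewrite author's own statement) =====
-- stated objective: alternative
-- what changed: Replaced the fused single-pass loop maintaining a running sum and running minimum with a sort-based scheme: sort the list, drop the first (smallest) element, and sum the remainder.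
import Mathlib
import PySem

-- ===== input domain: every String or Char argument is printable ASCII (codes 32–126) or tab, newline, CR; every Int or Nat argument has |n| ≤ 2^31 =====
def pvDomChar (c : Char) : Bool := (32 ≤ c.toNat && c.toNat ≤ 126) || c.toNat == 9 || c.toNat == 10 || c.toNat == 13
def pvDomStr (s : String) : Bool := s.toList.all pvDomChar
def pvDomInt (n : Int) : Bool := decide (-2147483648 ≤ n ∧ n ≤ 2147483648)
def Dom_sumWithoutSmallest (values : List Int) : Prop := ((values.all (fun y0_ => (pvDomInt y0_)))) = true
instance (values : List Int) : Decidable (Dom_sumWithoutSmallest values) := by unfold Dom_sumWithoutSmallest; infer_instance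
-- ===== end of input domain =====

-- B replaces A's fused sum/min loop with a sort-based alternative of similar cost: sort, drop the smallest, sum the rest.
-- ===== PORT A =====
-- literal port of A: guard `values != []`, then one loop over the list maintaining (smallest, listSum)
def sumWithoutSmallest (values : List Int) : Int :=
  if values ≠ [] then
    match values with
    | [] => 0
    | v0 :: _ =>
      let st := values.foldl
        (fun (p : Int × Int) x => ((if x < p.1 then x else p.1), p.2 + x)) (v0, 0)
      st.2 - st.1
  else 0

-- ===== PORT B =====
-- literal port of B: sum(sorted(values)[1:])
def sumWithoutSmallest_alt (values : List Int) : Int :=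
  (PySem.List.slice (PySem.List.sorted values (fun x => x)) (some 1) none).sum

-- ===== PRECONDITION & SPEC =====
def Spec_sumWithoutSmallest (values : List Int) (out : Int) : Prop := out = sumWithoutSmallest_alt values
instance (values : List Int) (out : Int) : Decidable (Spec_sumWithoutSmallest values out) := by unfold Spec_sumWithoutSmallest; infer_instance

-- ===== CLAIM (what is proved, stated in full; the proofs are below) =====
def Claim_equal_sumWithoutSmallest : Prop := ∀ (values : List Int), Dom_sumWithoutSmallest values → Spec_sumWithoutSmallest values (sumWithoutSmallest values)

-- ===== LEMMAS AND PROOFS =====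

-- ===== VERDICT (by name: the statement is the Claim_ definition above) =====
-- the fused fold of A computes (foldl min v0, running sum)
lemma pvFold_pair (l : List Int) (s a : Int) :
    l.foldl (fun (p : Int × Int) x => ((if x < p.1 then x else p.1), p.2 + x)) (s, a)
      = (l.foldl min s, a + l.sum) := by
  induction l generalizing s a with
  | nil => simp
  | cons x t ih =>
    simp only [List.foldl_cons, List.sum_cons, ih]
    have hm : (if x < s then x else s) = min s x := by
      rcases lt_or_ge x s with h | h
      · simp [min_def, h, not_le.mpr h]
      · simp [not_lt.mpr h, h]
    rw [hm]
    exact Prod.ext rfl (by ring)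

lemma pvFoldMin_mem (l : List Int) (s : Int) : l.foldl min s = s ∨ l.foldl min s ∈ l := by
  induction l generalizing s with
  | nil => simp
  | cons x t ih =>
    simp only [List.foldl_cons]
    rcases ih (min s x) with h | h
    · rcases min_cases s x with ⟨he, _⟩ | ⟨he, _⟩
      · left; rw [h, he]
      · right; rw [h, he]; exact List.mem_cons_self ..
    · right; exact List.mem_cons_of_mem _ h

lemma pvFoldMin_le (l : List Int) (s : Int) : l.foldl min s ≤ s ∧ ∀ y ∈ l, l.foldl min s ≤ y := by
  induction l generalizing s with
  | nil => simp
  | cons x t ih =>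
    obtain ⟨h1, h2⟩ := ih (min s x)
    refine ⟨le_trans h1 (min_le_left ..), ?_⟩
    intro y hy
    rcases List.mem_cons.mp hy with rfl | hy
    · exact le_trans h1 (min_le_right ..)
    · exact h2 y hy

theorem sumWithoutSmallest_spec : Claim_equal_sumWithoutSmallest := by
  intro values _
  unfold Spec_sumWithoutSmallest sumWithoutSmallest sumWithoutSmallest_alt
  cases values with
  | nil => rfl
  | cons v0 t =>
    simp only [ne_eq, reduceCtorEq, not_false_eq_true, if_true, pvFold_pair,
      PySem.List.slice_from_one]
    -- name the sorted list; it is nonempty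
    rcases hs : PySem.List.sorted (v0 :: t) (fun x => x) with _ | ⟨m, rest⟩
    · exact absurd ((PySem.List.sorted_eq_nil_iff _ _ _).mp hs) (by simp)
    have hperm : (m :: rest).Perm (v0 :: t) := hs ▸ PySem.List.sorted_perm (v0 :: t) (fun x => x) false
    have hsum : m + rest.sum = v0 + t.sum := by
      have := hperm.sum_eq; simpa using this
    -- the fold-min equals the sorted head
    have hmmem : m ∈ v0 :: t := hperm.mem_iff.mp (List.mem_cons_self ..)
    have hmle : ∀ y ∈ v0 :: t, m ≤ y := PySem.List.key_head_sorted_le (key := fun x => x) (xs := v0 :: t) hs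
    have hfle := pvFoldMin_le t v0
    have hfmem : t.foldl min v0 ∈ v0 :: t := by
      rcases pvFoldMin_mem t v0 with h | h
      · rw [h]; exact List.mem_cons_self ..
      · exact List.mem_cons_of_mem _ h
    have heq : t.foldl min v0 = m := by
      refine le_antisymm ?_ (hmle _ hfmem)
      rcases List.mem_cons.mp hmmem with rfl | h
      · exact hfle.1
      · exact hfle.2 _ h
    simp only [List.foldl_cons, min_self, List.sum_cons, List.tail_cons, heq]
    omega
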